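-- pv_equiv track=rewrite | github.com/TakashiSasaki/email_host_lookup | email_host_lookup/email_host_lookup.py | detect_provider
-- ===== SOURCE A (Python) =====
-- from typing import List, Tuple
--
-- def detect_provider(mx_hosts: List[str]) -> str:
--     """Detect provider based on MX hostnames."""
--     for host in mx_hosts:
--         if "google.com" in host or "googlemail.com" in host:
--             return "Google Workspace"
--         elif "outlook.com" in host or "protection.outlook.com" in host:
--             return "Microsoft 365"
--         elif "yahoodns.net" in host:
--             return "Yahoo Mail"
--         elif "zoho.com" in host:
--             return "Zoho Mail"
--         elif "protonmail" in host or "proton.ch" in host: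
--             return "ProtonMail"
--         elif "fastmail" in host or "messagingengine.com" in host:
--             return "Fastmail"
--     return "Unknown or Custom Provider"
-- ===== SOURCE B (Python) =====
-- from typing import List, Optional, Tuple
--
-- PATTERNS: List[Tuple[Tuple[str, ...], str]] = [
--     (("google.com", "googlemail.com"), "Google Workspace"),
--     (("outlook.com", "protection.outlook.com"), "Microsoft 365"),
--     (("yahoodns.net",), "Yahoo Mail"),
--     (("zoho.com",), "Zoho Mail"),
--     (("protonmail", "proton.ch"), "ProtonMail"),
--     (("fastmail", "messagingengine.com"), "Fastmail"),
-- ]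
--
-- def _first_match_index(mx_hosts: List[str], subs: Tuple[str, ...]) -> Optional[int]:
--     """Index of the first host matched by this rule, or None."""
--     for i, host in enumerate(mx_hosts):
--         if any(sub in host for sub in subs):
--             return i
--     return None
--
-- def detect_provider(mx_hosts: List[str]) -> str:
--     """Detect provider based on MX hostnames.
--
--     Rule-major strategy: for each rule (in priority order) compute the first
--     host index it matches, then keep the rule with the smallest index; a
--     strict '<' comparison makes earlier rules win ties, which reproduces the
--     host-major first-match semantics."""
--     best_i: Optional[int] = None
--     best_provider: Optional[str] = None
--     for subs, provider in PATTERNS: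
--         i = _first_match_index(mx_hosts, subs)
--         if i is not None and (best_i is None or i < best_i):
--             best_i, best_provider = i, provider
--     return best_provider if best_provider is not None else "Unknown or Custom Provider"
-- ===== Notes on version B (the rewrite author's own statement) =====
-- stated objective: alternative
-- what changed: Inverted the loop nesting: instead of scanning hosts and testing the if/elif chain per host, B scans each rule once over the whole host list to get its first matching index, then selects the rule with the smallest index (strict < so earlier rules win ties).
import Mathlib
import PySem

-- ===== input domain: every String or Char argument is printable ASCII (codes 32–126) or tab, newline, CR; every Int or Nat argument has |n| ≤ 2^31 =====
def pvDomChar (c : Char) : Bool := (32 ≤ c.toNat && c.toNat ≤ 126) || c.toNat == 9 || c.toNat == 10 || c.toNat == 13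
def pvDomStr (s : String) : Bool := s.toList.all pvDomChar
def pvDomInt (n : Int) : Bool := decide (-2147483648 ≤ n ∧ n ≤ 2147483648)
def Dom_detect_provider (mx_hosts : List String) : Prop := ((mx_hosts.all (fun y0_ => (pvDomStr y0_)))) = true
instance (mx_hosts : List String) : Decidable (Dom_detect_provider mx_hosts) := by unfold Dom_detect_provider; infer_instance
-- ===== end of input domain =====

-- B inverts the loop nesting: per rule it finds the first matching host index over the whole
-- list, then keeps the rule with the smallest index (strict < ⇒ earlier rules win ties);
-- alternative algorithm of the same cost.

-- ===== PORT A =====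
def detect_provider : List String → String
  | [] => "Unknown or Custom Provider"
  | host :: rest =>
    if PySem.Str.isIn "google.com" host || PySem.Str.isIn "googlemail.com" host then
      "Google Workspace"
    else if PySem.Str.isIn "outlook.com" host || PySem.Str.isIn "protection.outlook.com" host then
      "Microsoft 365"
    else if PySem.Str.isIn "yahoodns.net" host then "Yahoo Mail"
    else if PySem.Str.isIn "zoho.com" host then "Zoho Mail"
    else if PySem.Str.isIn "protonmail" host || PySem.Str.isIn "proton.ch" host then "ProtonMail"
    else if PySem.Str.isIn "fastmail" host || PySem.Str.isIn "messagingengine.com" host then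
      "Fastmail"
    else detect_provider rest

-- ===== PORT B =====
def pvPatterns : List (List String × String) :=
  [ (["google.com", "googlemail.com"], "Google Workspace"),
    (["outlook.com", "protection.outlook.com"], "Microsoft 365"),
    (["yahoodns.net"], "Yahoo Mail"),
    (["zoho.com"], "Zoho Mail"),
    (["protonmail", "proton.ch"], "ProtonMail"),
    (["fastmail", "messagingengine.com"], "Fastmail") ]

-- 'any(sub in host for sub in subs)'
def pvMatch (subs : List String) (host : String) : Bool :=
  subs.any (fun sub => PySem.Str.isIn sub host)

-- the 'for i, host in enumerate(mx_hosts)' loop of _first_match_index, index accumulator i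
def pvFirstAux (subs : List String) (i : Nat) : List String → Option Nat
  | [] => none
  | host :: rest => if pvMatch subs host then some i else pvFirstAux subs (i + 1) rest

def pvFirstMatchIdx (mx_hosts : List String) (subs : List String) : Option Nat :=
  pvFirstAux subs 0 mx_hosts

-- one iteration of B's loop over PATTERNS (best_i, best_provider as one Option pair)
def pvStep (mx_hosts : List String) (best : Option (Nat × String))
    (pat : List String × String) : Option (Nat × String) :=
  match pvFirstMatchIdx mx_hosts pat.1, best with
  | none, b => b
  | some i, none => some (i, pat.2)
  | some i, some (bi, bp) => if i < bi then some (i, pat.2) else some (bi, bp)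

def detect_provider_alt (mx_hosts : List String) : String :=
  match pvPatterns.foldl (pvStep mx_hosts) none with
  | some (_, p) => p
  | none => "Unknown or Custom Provider"

-- ===== PRECONDITION & SPEC =====
def Spec_detect_provider (mx_hosts : List String) (out : String) : Prop := out = detect_provider_alt mx_hosts
instance (mx_hosts : List String) (out : String) : Decidable (Spec_detect_provider mx_hosts out) := by unfold Spec_detect_provider; infer_instance

-- ===== CLAIM (what is proved, stated in full; the proofs are below) =====
def Claim_equal_detect_provider : Prop := ∀ (mx_hosts : List String), Dom_detect_provider mx_hosts → Spec_detect_provider mx_hosts (detect_provider mx_hosts)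

-- ===== LEMMAS AND PROOFS =====

-- host-major reference (A's shape over the rule table), proof-only
def pvMatchHost (host : String) : List (List String × String) → Option String
  | [] => none
  | (subs, provider) :: rest =>
    if pvMatch subs host then some provider else pvMatchHost host rest

def pvHostMajor (ps : List (List String × String)) : List String → String
  | [] => "Unknown or Custom Provider"
  | host :: rest =>
    match pvMatchHost host ps with
    | some p => p
    | none => pvHostMajor ps rest

def pvShift (o : Option (Nat × String)) : Option (Nat × String) :=
  o.map (fun x => (x.1 + 1, x.2))

theorem pvFirstAux_succ (subs : List String) (t : List String) (i : Nat) :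
    pvFirstAux subs (i + 1) t = (pvFirstAux subs i t).map (· + 1) := by
  induction t generalizing i with
  | nil => rfl
  | cons h t ih =>
    simp only [pvFirstAux]
    by_cases hm : pvMatch subs h <;> simp [hm, ih]

theorem pvFirstMatchIdx_cons (h : String) (t : List String) (subs : List String) :
    pvFirstMatchIdx (h :: t) subs =
      if pvMatch subs h then some 0 else (pvFirstMatchIdx t subs).map (· + 1) := by
  simp only [pvFirstMatchIdx, pvFirstAux]
  by_cases hm : pvMatch subs h <;> simp [hm, pvFirstAux_succ subs t 0]

theorem pvFold_zero (ps : List (List String × String)) (mx : List String) (p : String) :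
    ps.foldl (pvStep mx) (some (0, p)) = some (0, p) := by
  induction ps with
  | nil => rfl
  | cons pat ps ih =>
    simp only [List.foldl_cons]
    have : pvStep mx (some (0, p)) pat = some (0, p) := by
      unfold pvStep
      cases pvFirstMatchIdx mx pat.1 with
      | none => rfl
      | some i => simp
    rw [this, ih]

theorem pvStep_cons (h : String) (t : List String) (acc : Option (Nat × String))
    (pat : List String × String) (hm : pvMatch pat.1 h = false) :
    pvStep (h :: t) (pvShift acc) pat = pvShift (pvStep t acc pat) := by
  unfold pvStep
  rw [pvFirstMatchIdx_cons, hm]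
  simp only [Bool.false_eq_true, if_false]
  cases hj : pvFirstMatchIdx t pat.1 with
  | none => simp
  | some j =>
    cases acc with
    | none => simp [pvShift]
    | some b =>
      obtain ⟨bi, bp⟩ := b
      by_cases hlt : j < bi <;>
        simp [pvShift, hlt]

theorem pvFold_shift (h : String) (t : List String) :
    ∀ (ps : List (List String × String)) (acc : Option (Nat × String)),
    ps.foldl (pvStep (h :: t)) (pvShift acc) =
      match pvMatchHost h ps with
      | some p => some (0, p)
      | none => pvShift (ps.foldl (pvStep t) acc) := by
  intro ps
  induction ps with
  | nil => intro acc; rfl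
  | cons pat ps ih =>
    intro acc
    obtain ⟨subs, provider⟩ := pat
    by_cases hm : pvMatch subs h
    · have hstep : pvStep (h :: t) (pvShift acc) (subs, provider) = some (0, provider) := by
        unfold pvStep
        rw [pvFirstMatchIdx_cons]
        simp only [hm, if_true]
        cases acc with
        | none => rfl
        | some b => obtain ⟨bi, bp⟩ := b; simp [pvShift]
      simp only [List.foldl_cons, hstep, pvFold_zero, pvMatchHost, hm, if_true]
    · simp only [List.foldl_cons, pvStep_cons h t acc (subs, provider) (by simpa using hm),
        pvMatchHost, hm]
      exact ih (pvStep t acc (subs, provider))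

theorem pvFold_nil (ps : List (List String × String)) (acc : Option (Nat × String)) :
    ps.foldl (pvStep []) acc = acc := by
  induction ps generalizing acc with
  | nil => rfl
  | cons pat ps ih =>
    simp only [List.foldl_cons]
    have : pvStep [] acc pat = acc := by
      unfold pvStep pvFirstMatchIdx pvFirstAux
      cases acc <;> rfl
    rw [this, ih]

theorem pvAlt_eq_hostMajor (mx : List String) :
    detect_provider_alt mx = pvHostMajor pvPatterns mx := by
  induction mx with
  | nil =>
    simp [detect_provider_alt, pvFold_nil, pvHostMajor]
  | cons h t ih =>
    unfold detect_provider_alt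
    have hsh : (none : Option (Nat × String)) = pvShift none := rfl
    rw [hsh, pvFold_shift h t pvPatterns none]
    cases hmh : pvMatchHost h pvPatterns with
    | some p => simp [pvHostMajor, hmh]
    | none =>
      simp only [pvHostMajor, hmh]
      rw [← ih]
      unfold detect_provider_alt
      cases pvPatterns.foldl (pvStep t) none with
      | none => rfl
      | some b => obtain ⟨bi, bp⟩ := b; rfl

theorem pvA_eq_hostMajor (mx : List String) :
    detect_provider mx = pvHostMajor pvPatterns mx := by
  induction mx with
  | nil => rfl
  | cons h t ih =>
    simp only [detect_provider, pvHostMajor, pvPatterns, pvMatchHost, pvMatch,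
      List.any_cons, List.any_nil, Bool.or_false]
    split_ifs <;> simp_all [pvPatterns]

-- ===== VERDICT (by name: the statement is the Claim_ definition above) =====
theorem detect_provider_spec : Claim_equal_detect_provider := by
  intro mx _
  unfold Spec_detect_provider
  rw [pvA_eq_hostMajor, pvAlt_eq_hostMajor]
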